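-- pv_equiv track=rewrite | github.com/robertatakenaka/Web | proc/xml_preproc/scilistatest_and_coletaxml.py | sort_scilista
-- ===== SOURCE A (Python) =====
-- def sort_scilista(scilista_items):
--     items = list(set([item.strip() for item in scilista_items]))
--     dellist = []
--     prlist = []
--     naheadlist = []
--     issuelist = []
--     for item in items:
--         if item.endswith('del'):
--             dellist.append(item)
--         elif item.endswith('pr'):
--             prlist.append(item)
--         elif item.endswith('nahead'):
--             naheadlist.append(item)
--         else:
--             issuelist.append(item)
--     return sorted(dellist) + sorted(prlist) + sorted(naheadlist) + sorted(issuelist)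
-- ===== SOURCE B (Python) =====
-- def sort_scilista(scilista_items):
--     def rank(item):
--         if item.endswith('del'):
--             return 0
--         if item.endswith('pr'):
--             return 1
--         if item.endswith('nahead'):
--             return 2
--         return 3
--     return sorted({item.strip() for item in scilista_items},
--                   key=lambda item: (rank(item), item))
-- ===== Notes on version B (the rewrite author's own statement) =====
-- stated objective: simpler
-- what changed: Replaced the four-bucket classify-then-sort-each-and-concatenate pass with one keyed sort: dedup the stripped items and sort once by the composite key (suffix rank, item).
import Mathlib
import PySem

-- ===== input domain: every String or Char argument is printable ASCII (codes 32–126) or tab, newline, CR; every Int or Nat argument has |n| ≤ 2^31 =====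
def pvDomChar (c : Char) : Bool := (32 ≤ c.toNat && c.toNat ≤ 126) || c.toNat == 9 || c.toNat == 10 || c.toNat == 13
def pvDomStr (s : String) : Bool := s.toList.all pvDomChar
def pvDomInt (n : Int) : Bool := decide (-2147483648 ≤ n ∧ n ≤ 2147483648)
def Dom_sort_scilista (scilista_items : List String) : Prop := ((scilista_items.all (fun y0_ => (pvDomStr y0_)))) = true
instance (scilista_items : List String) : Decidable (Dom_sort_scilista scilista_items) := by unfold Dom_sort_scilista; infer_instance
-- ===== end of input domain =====

-- B replaces A's four-bucket classify/sort-each/concatenate with one sort of the deduped items keyed by (suffix rank, item): simpler.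
-- ===== PORT A =====
def sort_scilista (scilista_items : List String) : List String :=
  let items : PySem.Set String :=
    PySem.Set.ofList (scilista_items.map (fun item => PySem.Str.strip item))
  let st := items.foldl
    (fun (acc : List String × List String × List String × List String) item =>
      if PySem.Str.endswith item "del" then (acc.1 ++ [item], acc.2.1, acc.2.2.1, acc.2.2.2)
      else if PySem.Str.endswith item "pr" then (acc.1, acc.2.1 ++ [item], acc.2.2.1, acc.2.2.2)
      else if PySem.Str.endswith item "nahead" then (acc.1, acc.2.1, acc.2.2.1 ++ [item], acc.2.2.2)
      else (acc.1, acc.2.1, acc.2.2.1, acc.2.2.2 ++ [item]))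
    ([], [], [], [])
  PySem.List.sorted st.1 (fun x => x) ++ PySem.List.sorted st.2.1 (fun x => x) ++
    PySem.List.sorted st.2.2.1 (fun x => x) ++ PySem.List.sorted st.2.2.2 (fun x => x)

-- ===== PORT B =====
-- rank(item): the elif suffix priority of the original, as a single key component
def pyRank (item : String) : Int :=
  if PySem.Str.endswith item "del" then 0
  else if PySem.Str.endswith item "pr" then 1
  else if PySem.Str.endswith item "nahead" then 2
  else 3

def sort_scilista_alt (scilista_items : List String) : List String :=
  PySem.List.sorted2
    (PySem.Set.ofList (scilista_items.map (fun item => PySem.Str.strip item)))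
    pyRank (fun item => item)

-- ===== PRECONDITION & SPEC =====
def Spec_sort_scilista (scilista_items : List String) (out : List String) : Prop := out = sort_scilista_alt scilista_items
instance (scilista_items : List String) (out : List String) : Decidable (Spec_sort_scilista scilista_items out) := by unfold Spec_sort_scilista; infer_instance

-- ===== CLAIM (what is proved, stated in full; the proofs are below) =====
def Claim_equal_sort_scilista : Prop := ∀ (scilista_items : List String), Dom_sort_scilista scilista_items → Spec_sort_scilista scilista_items (sort_scilista scilista_items)

-- ===== LEMMAS AND PROOFS =====

-- the bucket-membership tests of A's loop, as boolean predicates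
def pvC0 (x : String) : Bool := PySem.Str.endswith x "del"
def pvC1 (x : String) : Bool := !PySem.Str.endswith x "del" && PySem.Str.endswith x "pr"
def pvC2 (x : String) : Bool := !PySem.Str.endswith x "del" && !PySem.Str.endswith x "pr" && PySem.Str.endswith x "nahead"
def pvC3 (x : String) : Bool := !PySem.Str.endswith x "del" && !PySem.Str.endswith x "pr" && !PySem.Str.endswith x "nahead"

-- B's composite key, as a lexicographic linear-order key
def pvKey (x : String) : Lex (Int × String) := toLex (pyRank x, x)

theorem pv_bucket_gen (P Q R : String → Bool) (l : List String) (a b c d : List String) :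
    l.foldl (fun (acc : List String × List String × List String × List String) item =>
      if P item then (acc.1 ++ [item], acc.2.1, acc.2.2.1, acc.2.2.2)
      else if Q item then (acc.1, acc.2.1 ++ [item], acc.2.2.1, acc.2.2.2)
      else if R item then (acc.1, acc.2.1, acc.2.2.1 ++ [item], acc.2.2.2)
      else (acc.1, acc.2.1, acc.2.2.1, acc.2.2.2 ++ [item])) (a, b, c, d)
    = (a ++ l.filter P,
       b ++ l.filter (fun x => !P x && Q x),
       c ++ l.filter (fun x => !P x && !Q x && R x),
       d ++ l.filter (fun x => !P x && !Q x && !R x)) := by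
  induction l generalizing a b c d with
  | nil => simp
  | cons x t ih =>
    simp only [List.foldl_cons]
    by_cases h0 : P x = true
    · simp [h0, ih, List.filter_cons]
    · by_cases h1 : Q x = true
      · simp [h0, h1, ih, List.filter_cons]
      · by_cases h2 : R x = true
        · simp [h0, h1, h2, ih, List.filter_cons]
        · simp [h0, h1, h2, ih, List.filter_cons]

theorem pv_bucket_foldl (l : List String) (a b c d : List String) :
    l.foldl (fun (acc : List String × List String × List String × List String) item =>
      if PySem.Str.endswith item "del" then (acc.1 ++ [item], acc.2.1, acc.2.2.1, acc.2.2.2)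
      else if PySem.Str.endswith item "pr" then (acc.1, acc.2.1 ++ [item], acc.2.2.1, acc.2.2.2)
      else if PySem.Str.endswith item "nahead" then (acc.1, acc.2.1, acc.2.2.1 ++ [item], acc.2.2.2)
      else (acc.1, acc.2.1, acc.2.2.1, acc.2.2.2 ++ [item])) (a, b, c, d)
    = (a ++ l.filter pvC0, b ++ l.filter pvC1, c ++ l.filter pvC2, d ++ l.filter pvC3) :=
  pv_bucket_gen (fun x => PySem.Str.endswith x "del") (fun x => PySem.Str.endswith x "pr")
    (fun x => PySem.Str.endswith x "nahead") l a b c d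

theorem pv_filter_perm (l : List String) :
    (l.filter pvC0 ++ (l.filter pvC1 ++ (l.filter pvC2 ++ l.filter pvC3))).Perm l := by
  induction l with
  | nil => simp
  | cons x t ih =>
    by_cases h0 : PySem.Str.endswith x "del" = true
    · simp at h0
      have e0 : pvC0 x = true := by simp [pvC0, h0]
      have e1 : pvC1 x = false := by simp [pvC1, h0]
      have e2 : pvC2 x = false := by simp [pvC2, h0]
      have e3 : pvC3 x = false := by simp [pvC3, h0]
      simp only [List.filter_cons, e0, e1, e2, e3, Bool.false_eq_true, reduceIte,
        List.cons_append]
      exact ih.cons x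
    · by_cases h1 : PySem.Str.endswith x "pr" = true
      · simp at h0 h1
        have e0 : pvC0 x = false := by simp [pvC0, h0]
        have e1 : pvC1 x = true := by simp [pvC1, h0, h1]
        have e2 : pvC2 x = false := by simp [pvC2, h1]
        have e3 : pvC3 x = false := by simp [pvC3, h1]
        simp only [List.filter_cons, e0, e1, e2, e3, Bool.false_eq_true, reduceIte,
          List.cons_append]
        exact List.Perm.trans List.perm_middle (ih.cons x)
      · by_cases h2 : PySem.Str.endswith x "nahead" = true
        · simp at h0 h1 h2
          have e0 : pvC0 x = false := by simp [pvC0, h0]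
          have e1 : pvC1 x = false := by simp [pvC1, h1]
          have e2 : pvC2 x = true := by simp [pvC2, h0, h1, h2]
          have e3 : pvC3 x = false := by simp [pvC3, h2]
          simp only [List.filter_cons, e0, e1, e2, e3, Bool.false_eq_true, reduceIte,
            List.cons_append]
          exact ((List.Perm.append_left _ List.perm_middle).trans List.perm_middle).trans (ih.cons x)
        · simp at h0 h1 h2
          have e0 : pvC0 x = false := by simp [pvC0, h0]
          have e1 : pvC1 x = false := by simp [pvC1, h1]
          have e2 : pvC2 x = false := by simp [pvC2, h2]
          have e3 : pvC3 x = true := by simp [pvC3, h0, h1, h2]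
          simp only [List.filter_cons, e0, e1, e2, e3, Bool.false_eq_true, reduceIte,
            List.cons_append]
          refine ((List.Perm.append_left _ (List.Perm.append_left _ List.perm_middle)).trans ?_)
          exact ((List.Perm.append_left _ List.perm_middle).trans List.perm_middle).trans (ih.cons x)

theorem pv_rank0 {x : String} (h : pvC0 x = true) : pyRank x = 0 := by
  simp only [pvC0] at h
  unfold pyRank; rw [h]; simp
theorem pv_rank1 {x : String} (h : pvC1 x = true) : pyRank x = 1 := by
  simp only [pvC1, Bool.and_eq_true, Bool.not_eq_true'] at h
  unfold pyRank; rw [h.1, h.2]; simp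
theorem pv_rank2 {x : String} (h : pvC2 x = true) : pyRank x = 2 := by
  simp only [pvC2, Bool.and_eq_true, Bool.not_eq_true'] at h
  unfold pyRank; rw [h.1.1, h.1.2, h.2]; simp
theorem pv_rank3 {x : String} (h : pvC3 x = true) : pyRank x = 3 := by
  simp only [pvC3, Bool.and_eq_true, Bool.not_eq_true'] at h
  unfold pyRank; rw [h.1.1, h.1.2, h.2]; simp

theorem pv_key_lt_iff (a b : String) :
    pvKey a < pvKey b ↔ (pyRank a < pyRank b ∨ (pyRank a = pyRank b ∧ a < b)) := by
  simp [pvKey, Prod.Lex.lt_iff]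

theorem pv_sorted_pairwise_lt (m : List String) (hm : m.Nodup) :
    (PySem.List.sorted m (fun x => x)).Pairwise (fun a b : String => a < b) := by
  have h1 := PySem.List.sorted_pairwise m (fun x => x)
  have h2 : (PySem.List.sorted m (fun x => x)).Nodup :=
    ((PySem.List.sorted_perm m (fun x => x) false).symm).nodup hm
  exact (h1.and h2).imp (fun hab => lt_of_le_of_ne hab.1 hab.2)

-- each bucket, sorted, is strictly increasing under pvKey (rank is constant ci ↦ ri on it)
theorem pv_block_pairwise (l : List String) (hl : l.Nodup) (c : String → Bool) (r : Int)
    (hr : ∀ x, c x = true → pyRank x = r) :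
    (PySem.List.sorted (l.filter c) (fun x => x)).Pairwise (fun a b => pvKey a < pvKey b) := by
  refine List.Pairwise.imp_of_mem ?_ (pv_sorted_pairwise_lt (l.filter c) (hl.filter c))
  intro a b ha hb hab
  have ha' : c a = true := List.of_mem_filter ((PySem.List.mem_sorted _ _ _ a).mp ha)
  have hb' : c b = true := List.of_mem_filter ((PySem.List.mem_sorted _ _ _ b).mp hb)
  exact (pv_key_lt_iff a b).mpr (Or.inr ⟨by rw [hr a ha', hr b hb'], hab⟩)

theorem pv_block_mem_rank (l : List String) (c : String → Bool) (r : Int)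
    (hr : ∀ x, c x = true → pyRank x = r) :
    ∀ x ∈ PySem.List.sorted (l.filter c) (fun x => x), pyRank x = r := by
  intro x hx
  exact hr x (List.of_mem_filter ((PySem.List.mem_sorted _ _ _ x).mp hx))

theorem pv_sorted2_eq (m : List String) :
    PySem.List.sorted2 m pyRank (fun x => x) = PySem.List.sorted m pvKey := by
  rw [PySem.List.sorted_eq_foldl_insertBy m pvKey]
  show m.foldl (fun acc x => PySem.List.insertBy
      (fun a b => decide (pyRank a < pyRank b) || (!decide (pyRank b < pyRank a) && decide (a < b)))
      x acc) [] = _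
  have hb : ∀ a b : String,
      (decide (pyRank a < pyRank b) || (!decide (pyRank b < pyRank a) && decide (a < b)))
        = decide (pvKey a < pvKey b) := by
    intro a b
    by_cases h1 : pyRank a < pyRank b
    · simp [h1, pv_key_lt_iff]
    · by_cases h2 : pyRank b < pyRank a
      · have hne : pyRank a ≠ pyRank b := ne_of_gt h2
        simp [h1, h2, pv_key_lt_iff, hne]
      · have he : pyRank a = pyRank b := le_antisymm (not_lt.mp h2) (not_lt.mp h1)
        simp [h1, h2, pv_key_lt_iff, he]
  simp only [hb]

theorem pv_main (xs : List String) : sort_scilista xs = sort_scilista_alt xs := by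
  simp only [sort_scilista, sort_scilista_alt]
  rw [pv_sorted2_eq]
  simp only [pv_bucket_foldl, List.nil_append]
  rw [List.append_assoc, List.append_assoc]
  have hl : (PySem.Set.ofList (xs.map (fun item => PySem.Str.strip item)) : List String).Nodup :=
    PySem.Set.nodup_ofList _
  refine (PySem.List.sorted_eq_of_perm_of_pairwise_lt _ _ pvKey ?_ ?_).symm
  · exact (((PySem.List.sorted_perm _ (fun x : String => x) false).append
      ((PySem.List.sorted_perm _ (fun x : String => x) false).append
        ((PySem.List.sorted_perm _ (fun x : String => x) false).append
          (PySem.List.sorted_perm _ (fun x : String => x) false)))).trans (pv_filter_perm _))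
  · have p0 := pv_block_pairwise _ hl pvC0 0 (fun x => pv_rank0)
    have p1 := pv_block_pairwise _ hl pvC1 1 (fun x => pv_rank1)
    have p2 := pv_block_pairwise _ hl pvC2 2 (fun x => pv_rank2)
    have p3 := pv_block_pairwise _ hl pvC3 3 (fun x => pv_rank3)
    have m0 := pv_block_mem_rank (PySem.Set.ofList (xs.map (fun item => PySem.Str.strip item))) pvC0 0 (fun x => pv_rank0)
    have m1 := pv_block_mem_rank (PySem.Set.ofList (xs.map (fun item => PySem.Str.strip item))) pvC1 1 (fun x => pv_rank1)
    have m2 := pv_block_mem_rank (PySem.Set.ofList (xs.map (fun item => PySem.Str.strip item))) pvC2 2 (fun x => pv_rank2)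
    have m3 := pv_block_mem_rank (PySem.Set.ofList (xs.map (fun item => PySem.Str.strip item))) pvC3 3 (fun x => pv_rank3)
    rw [List.pairwise_append]
    refine ⟨p0, ?_, ?_⟩
    · rw [List.pairwise_append]
      refine ⟨p1, ?_, ?_⟩
      · rw [List.pairwise_append]
        refine ⟨p2, p3, ?_⟩
        · intro a ha b hb
          exact (pv_key_lt_iff a b).mpr (Or.inl (by rw [m2 a ha, m3 b hb]; norm_num))
      · intro a ha b hb
        rcases List.mem_append.mp hb with hb | hb
        · exact (pv_key_lt_iff a b).mpr (Or.inl (by rw [m1 a ha, m2 b hb]; norm_num))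
        · exact (pv_key_lt_iff a b).mpr (Or.inl (by rw [m1 a ha, m3 b hb]; norm_num))
    · intro a ha b hb
      rcases List.mem_append.mp hb with hb | hb
      · exact (pv_key_lt_iff a b).mpr (Or.inl (by rw [m0 a ha, m1 b hb]; norm_num))
      · rcases List.mem_append.mp hb with hb | hb
        · exact (pv_key_lt_iff a b).mpr (Or.inl (by rw [m0 a ha, m2 b hb]; norm_num))
        · exact (pv_key_lt_iff a b).mpr (Or.inl (by rw [m0 a ha, m3 b hb]; norm_num))

-- ===== VERDICT (by name: the statement is the Claim_ definition above) =====
theorem sort_scilista_spec : Claim_equal_sort_scilista := by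
  intro xs _
  exact pv_main xs
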